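-- pv_equiv track=rewrite | github.com/DiksonSantos/Curso_Intensivo_Python | Pagina_227_Faça_Você_Mesmo.py | make_great
-- ===== SOURCE A (Python) =====
-- def make_great(magicians):  			#Função Para Armazenar os Itens da Lista
--     '''Add 'the Great!' to each magician's name.'''
--     # Build a new list to hold the great musicians.
--     great_magicians = []
--
--     # Make each magician great, and add it to great_magicians.
--     while magicians:				#Enquanto houver itens na lista, faça os procedimentos a baixo.
--         magician = magicians.pop()		#Tirou da Lista de Entrada (Magicians), Colocou em MAGICIAN
--         great_magician = magician + ' THE GREAT' #Guardou MAGICIAN em GREAT_MAGICIAN , e Dentro desta Ultmi, Fez a Concatenação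
--         great_magicians.append(great_magician)  # GREAT MAGICIANS Que Era a Lista VAZIA Criada Ali Em Cima, Recebe GREAT_MAGICIAN  Que Contem os Itens Concatenados.
--
--     # Add the great magicians back into magicians.
--     for great_magician in great_magicians: 	# Percorre a EX Lista Vazia
--         magicians.append(great_magician)	#Devolve a EX Lista Vazia para a Variavél Interna da Função (Que P| Fuder c\ td tem o mesmo Nome do Parametro da função
--
--     return magicians				#Retorna a Ultima VAR Com as Infs Transformadas
-- ===== SOURCE B (Python) =====
-- def make_great(magicians):
--     '''Add 'the Great!' to each magician's name.'''
--     # Rebuild the same list object in place: comprehension over the reversed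
--     # input, assigned back via slice assignment (matches A's mutation of the
--     # argument: same final contents of the same list object).
--     magicians[:] = [magician + ' THE GREAT' for magician in reversed(magicians)]
--     return magicians
-- ===== Notes on version B (the rewrite author's own statement) =====
-- stated objective: simpler
-- what changed: Replaces the pop-until-empty loop into an auxiliary list followed by an append-back loop with a single comprehension over reversed(magicians) slice-assigned back in place.
import Mathlib
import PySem

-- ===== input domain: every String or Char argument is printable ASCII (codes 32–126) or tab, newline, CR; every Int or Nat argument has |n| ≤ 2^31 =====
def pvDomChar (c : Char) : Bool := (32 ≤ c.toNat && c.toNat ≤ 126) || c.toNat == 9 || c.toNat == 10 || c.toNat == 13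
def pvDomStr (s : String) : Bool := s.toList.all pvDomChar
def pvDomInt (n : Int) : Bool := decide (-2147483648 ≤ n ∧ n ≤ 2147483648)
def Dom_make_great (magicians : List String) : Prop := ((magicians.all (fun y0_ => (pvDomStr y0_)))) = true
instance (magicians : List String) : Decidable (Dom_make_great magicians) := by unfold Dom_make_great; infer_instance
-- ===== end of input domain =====

-- B rebuilds the list as a comprehension over the reversed input instead of A's
-- pop-until-empty loop plus append-back loop (objective: simpler). Both Pythons
-- mutate the argument list; the equivalence proved here is about the return value.
-- ===== PORT A =====
-- while magicians: pop the last element, append it + ' THE GREAT' to great_magicians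
def makeGreatPopLoop (magicians great_magicians : List String) : List String :=
  if h : magicians = [] then great_magicians
  else makeGreatPopLoop magicians.dropLast
        (great_magicians ++ [magicians.getLast h ++ " THE GREAT"])
termination_by magicians.length
decreasing_by
  have : 0 < magicians.length := List.length_pos_of_ne_nil h
  simp [List.length_dropLast]; omega

def make_great (magicians : List String) : List String :=
  let great_magicians := makeGreatPopLoop magicians []
  -- for great_magician in great_magicians: magicians.append(great_magician)
  great_magicians.foldl (fun acc great_magician => acc ++ [great_magician]) []

-- ===== PORT B =====
def make_great_alt (magicians : List String) : List String :=
  magicians.reverse.map (fun magician => magician ++ " THE GREAT")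

-- ===== PRECONDITION & SPEC =====
def Spec_make_great (magicians : List String) (out : List String) : Prop := out = make_great_alt magicians
instance (magicians : List String) (out : List String) : Decidable (Spec_make_great magicians out) := by unfold Spec_make_great; infer_instance

-- ===== CLAIM (what is proved, stated in full; the proofs are below) =====
def Claim_equal_make_great : Prop := ∀ (magicians : List String), Dom_make_great magicians → Spec_make_great magicians (make_great magicians)

-- ===== LEMMAS AND PROOFS =====

-- ===== VERDICT (by name: the statement is the Claim_ definition above) =====
theorem makeGreatPopLoop_eq (magicians : List String) : ∀ gm,
    makeGreatPopLoop magicians gm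
      = gm ++ magicians.reverse.map (fun m => m ++ " THE GREAT") := by
  induction magicians using List.reverseRecOn with
  | nil => intro gm; simp [makeGreatPopLoop]
  | append_singleton xs x ih =>
    intro gm
    rw [makeGreatPopLoop]
    simp [ih]

theorem foldl_append_id (l acc : List String) :
    l.foldl (fun a g => a ++ [g]) acc = acc ++ l := by
  induction l generalizing acc with
  | nil => simp
  | cons x xs ih => simp [List.foldl, ih]

theorem make_great_spec : Claim_equal_make_great := by
  intro magicians _
  unfold Spec_make_great make_great make_great_alt
  rw [makeGreatPopLoop_eq, foldl_append_id]
  simp
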